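-- pv_equiv track=rewrite | github.com/caihuayi/noc-map-python | buildNoCTOPO.py | buildNoCTOPO
-- ===== SOURCE A (Python) =====
-- def buildNoCTOPO(mesh_x, mesh_y, mesh_z):
-- 	topo = {}
--
-- 	count = mesh_x * mesh_y * mesh_z
-- 	for i in range(1, count+1):
-- 		j = i-1
-- 		edges = {}
-- 		edges[i] = 0
-- 		# 判断有无向前连接
-- 		if (j//mesh_x) % mesh_y != 0:
-- 			edges[i - mesh_y] = 1
-- 		# 判断有无向后连接
-- 		if (j//mesh_x) % mesh_y != mesh_y-1:
-- 			edges[i + mesh_y] = 1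
-- 		# 判断有无向左连接
-- 		if (j % mesh_x) != 0:
-- 			edges[i-1] = 1
-- 		# 判断有无向右连接
-- 		if (j % mesh_x) != mesh_x-1:
-- 			edges[i+1] = 1
-- 		# 判断有无向下连接
-- 		if (j // (mesh_x * mesh_y) != 0):
-- 			edges[i - mesh_x*mesh_y] = 1
-- 		# 判断有无向上连接
-- 		if (j // (mesh_x * mesh_y) != mesh_z-1):
-- 			edges[i + mesh_x * mesh_y] = 1
-- 		topo[i] = edges
-- 	return topo
-- ===== SOURCE B (Python) =====
-- def buildNoCTOPO(mesh_x, mesh_y, mesh_z):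
--     # Edge-centric staged construction: first a pass creating every node with its
--     # self-loop, then six passes, one per link direction, each enumerating exactly
--     # the nodes that have a neighbour in that direction (generated from coordinate
--     # ranges, no divisions or per-node tests) and appending that link.
--     if mesh_x <= 0 or mesh_y <= 0 or mesh_z <= 0:
--         return {}
--     xy = mesh_x * mesh_y
--     n = xy * mesh_z
--     topo = {i: {i: 0} for i in range(1, n + 1)}
--
--     def ids(zr, yr, xr):
--         return [z * xy + y * mesh_x + x + 1 for z in zr for y in yr for x in xr]
--
--     Z, Y, X = range(mesh_z), range(mesh_y), range(mesh_x)
--     passes = [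
--         (ids(Z, range(1, mesh_y), X), -mesh_y),
--         (ids(Z, range(mesh_y - 1), X), mesh_y),
--         (ids(Z, Y, range(1, mesh_x)), -1),
--         (ids(Z, Y, range(mesh_x - 1)), 1),
--         (ids(range(1, mesh_z), Y, X), -xy),
--         (ids(range(mesh_z - 1), Y, X), xy),
--     ]
--     for node_list, offset in passes:
--         for i in node_list:
--             topo[i][i + offset] = 1
--     return topo
-- ===== Notes on version B (the rewrite author's own statement) =====
-- stated objective: alternative
-- what changed: Replaces A's single per-node loop (which decodes coordinates with // and % and adds all six links of one node at a time) by an edge-centric staged construction: one pass creating every node with its self-loop, then six passes, one per link direction, each enumerating exactly the nodes that have a neighbour in that direction from coordinate ranges and appending that single link.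
-- outside the precondition, e.g. on buildNoCTOPO(1, -1, -2): A returns {1: {1: 0, 0: 1}, 2: {2: 0, 1: 1, 3: 1}}, B returns {}
import Mathlib
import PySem

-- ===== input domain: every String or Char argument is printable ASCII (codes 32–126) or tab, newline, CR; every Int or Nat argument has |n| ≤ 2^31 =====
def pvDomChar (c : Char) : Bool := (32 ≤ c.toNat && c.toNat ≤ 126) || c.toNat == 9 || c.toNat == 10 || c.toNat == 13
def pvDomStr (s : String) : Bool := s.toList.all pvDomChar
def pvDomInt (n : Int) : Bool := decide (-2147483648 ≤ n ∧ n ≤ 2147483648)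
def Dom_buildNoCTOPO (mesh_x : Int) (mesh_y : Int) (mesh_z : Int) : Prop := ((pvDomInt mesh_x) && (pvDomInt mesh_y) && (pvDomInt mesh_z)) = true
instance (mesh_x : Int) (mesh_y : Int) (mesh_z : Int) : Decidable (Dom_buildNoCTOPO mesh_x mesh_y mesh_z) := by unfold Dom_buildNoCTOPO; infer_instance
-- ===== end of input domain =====

-- B builds the topology edge-centrically in staged passes (one pass per link direction over
-- coordinate-generated node lists) instead of A's per-node loop with //-%-decoding; alternative
-- decomposition, same cost.


-- ===== PORT A =====
def buildNoCTOPO (mesh_x : Int) (mesh_y : Int) (mesh_z : Int) : List (Int × List (Int × Int)) :=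
  let count := mesh_x * mesh_y * mesh_z
  let topo : PySem.Dict Int (List (Int × Int)) :=
    (PySem.List.pyRange 1 (count + 1)).foldl
      (fun topo i =>
        let j := i - 1
        let edges : PySem.Dict Int Int := ⟨[]⟩
        let edges := edges.insert i 0
        let edges := if PySem.Int.mod (PySem.Int.floordiv j mesh_x) mesh_y ≠ 0 then edges.insert (i - mesh_y) 1 else edges
        let edges := if PySem.Int.mod (PySem.Int.floordiv j mesh_x) mesh_y ≠ mesh_y - 1 then edges.insert (i + mesh_y) 1 else edges
        let edges := if PySem.Int.mod j mesh_x ≠ 0 then edges.insert (i - 1) 1 else edges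
        let edges := if PySem.Int.mod j mesh_x ≠ mesh_x - 1 then edges.insert (i + 1) 1 else edges
        let edges := if PySem.Int.floordiv j (mesh_x * mesh_y) ≠ 0 then edges.insert (i - mesh_x * mesh_y) 1 else edges
        let edges := if PySem.Int.floordiv j (mesh_x * mesh_y) ≠ mesh_z - 1 then edges.insert (i + mesh_x * mesh_y) 1 else edges
        topo.insert i edges.items)
      ⟨[]⟩
  topo.items

-- ===== PORT B =====
-- Staged, edge-centric construction: node pass creating the self-loops, then six link passes.
-- topo[i][i+off] = 1 is ported as Dict.modify (the key i is always present: ids only produces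
-- in-range node numbers, so Python's KeyError path is unreachable).
def buildNoCTOPO_alt (mesh_x : Int) (mesh_y : Int) (mesh_z : Int) : List (Int × List (Int × Int)) :=
  if mesh_x ≤ 0 ∨ mesh_y ≤ 0 ∨ mesh_z ≤ 0 then [] else
  let xy := mesh_x * mesh_y
  let n := xy * mesh_z
  let topo : PySem.Dict Int (List (Int × Int)) :=
    (PySem.List.pyRange 1 (n + 1)).foldl (fun d i => d.insert i [(i, 0)]) ⟨[]⟩
  let ids := fun (zr yr xr : List Int) =>
    zr.flatMap (fun z => yr.flatMap (fun y => xr.map (fun x => z * xy + y * mesh_x + x + 1)))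
  let Z := PySem.List.pyRange 0 mesh_z
  let Y := PySem.List.pyRange 0 mesh_y
  let X := PySem.List.pyRange 0 mesh_x
  let passes : List (List Int × Int) :=
    [ (ids Z (PySem.List.pyRange 1 mesh_y) X, -mesh_y),
      (ids Z (PySem.List.pyRange 0 (mesh_y - 1)) X, mesh_y),
      (ids Z Y (PySem.List.pyRange 1 mesh_x), -1),
      (ids Z Y (PySem.List.pyRange 0 (mesh_x - 1)), 1),
      (ids (PySem.List.pyRange 1 mesh_z) Y X, -xy),
      (ids (PySem.List.pyRange 0 (mesh_z - 1)) Y X, xy) ]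
  let topo := passes.foldl
      (fun topo p => p.1.foldl
        (fun topo i => topo.modify i [] (fun e => (PySem.Dict.insert (⟨e⟩ : PySem.Dict Int Int) (i + p.2) (1 : Int)).items))
        topo)
      topo
  topo.items

-- ===== PRECONDITION & SPEC =====
-- Pre_ excludes only triples with exactly two negative dimensions (a negative dimension with
-- a positive product): negative sizes lie outside the natural domain of a mesh, and there A's
-- flat loop still runs x*y*z times emitting meaningless node ids while B returns the empty dict.
def Pre_buildNoCTOPO (mesh_x : Int) (mesh_y : Int) (mesh_z : Int) : Prop :=
  (0 ≤ mesh_x ∧ 0 ≤ mesh_y ∧ 0 ≤ mesh_z) ∨ mesh_x * mesh_y * mesh_z ≤ 0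
instance (mesh_x : Int) (mesh_y : Int) (mesh_z : Int) : Decidable (Pre_buildNoCTOPO mesh_x mesh_y mesh_z) := by unfold Pre_buildNoCTOPO; infer_instance
def pvWitness_buildNoCTOPO : Int × Int × Int := (2, 3, 2)

def Spec_buildNoCTOPO (mesh_x : Int) (mesh_y : Int) (mesh_z : Int) (out : List (Int × List (Int × Int))) : Prop := out = buildNoCTOPO_alt mesh_x mesh_y mesh_z
instance (mesh_x : Int) (mesh_y : Int) (mesh_z : Int) (out : List (Int × List (Int × Int))) : Decidable (Spec_buildNoCTOPO mesh_x mesh_y mesh_z out) := by unfold Spec_buildNoCTOPO; infer_instance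

-- ===== CLAIM (what is proved, stated in full; the proofs are below) =====
def Claim_equal_buildNoCTOPO : Prop := ∀ (mesh_x : Int) (mesh_y : Int) (mesh_z : Int), Dom_buildNoCTOPO mesh_x mesh_y mesh_z → Pre_buildNoCTOPO mesh_x mesh_y mesh_z → Spec_buildNoCTOPO mesh_x mesh_y mesh_z (buildNoCTOPO mesh_x mesh_y mesh_z)

-- ===== LEMMAS AND PROOFS =====

-- the per-node edge dict A builds for linear index i (proof-side copy of A's loop body,
-- one named definition per conditional insert so the chain can be rewritten level by level)
def fA0 (i : Int) : PySem.Dict Int Int := (⟨[]⟩ : PySem.Dict Int Int).insert i 0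
def fA1 (mesh_x mesh_y i : Int) : PySem.Dict Int Int :=
  if PySem.Int.mod (PySem.Int.floordiv (i - 1) mesh_x) mesh_y ≠ 0 then (fA0 i).insert (i - mesh_y) 1 else fA0 i
def fA2 (mesh_x mesh_y i : Int) : PySem.Dict Int Int :=
  if PySem.Int.mod (PySem.Int.floordiv (i - 1) mesh_x) mesh_y ≠ mesh_y - 1 then (fA1 mesh_x mesh_y i).insert (i + mesh_y) 1 else fA1 mesh_x mesh_y i
def fA3 (mesh_x mesh_y i : Int) : PySem.Dict Int Int :=
  if PySem.Int.mod (i - 1) mesh_x ≠ 0 then (fA2 mesh_x mesh_y i).insert (i - 1) 1 else fA2 mesh_x mesh_y i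
def fA4 (mesh_x mesh_y i : Int) : PySem.Dict Int Int :=
  if PySem.Int.mod (i - 1) mesh_x ≠ mesh_x - 1 then (fA3 mesh_x mesh_y i).insert (i + 1) 1 else fA3 mesh_x mesh_y i
def fA5 (mesh_x mesh_y i : Int) : PySem.Dict Int Int :=
  if PySem.Int.floordiv (i - 1) (mesh_x * mesh_y) ≠ 0 then (fA4 mesh_x mesh_y i).insert (i - mesh_x * mesh_y) 1 else fA4 mesh_x mesh_y i
def fA6 (mesh_x mesh_y mesh_z i : Int) : PySem.Dict Int Int :=
  if PySem.Int.floordiv (i - 1) (mesh_x * mesh_y) ≠ mesh_z - 1 then (fA5 mesh_x mesh_y i).insert (i + mesh_x * mesh_y) 1 else fA5 mesh_x mesh_y i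
def fA (mesh_x mesh_y mesh_z i : Int) : List (Int × Int) := (fA6 mesh_x mesh_y mesh_z i).items

-- one link-append on a stored edge list (proof-side name for B's modify body at key k)
def hins (k off : Int) (e : List (Int × Int)) : List (Int × Int) :=
  (PySem.Dict.insert (⟨e⟩ : PySem.Dict Int Int) (k + off) (1 : Int)).items

lemma buildNoCTOPO_eq_foldl (mesh_x mesh_y mesh_z : Int) :
    buildNoCTOPO mesh_x mesh_y mesh_z =
      ((PySem.List.pyRange 1 (mesh_x * mesh_y * mesh_z + 1)).foldl
        (fun (d : PySem.Dict Int (List (Int × Int))) i => d.insert i (fA mesh_x mesh_y mesh_z i)) ⟨[]⟩).items := rfl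

lemma pyRange_one_natCast (N : Nat) :
    PySem.List.pyRange 1 ((N : Int) + 1) = (List.range N).map (fun (k : Nat) => ((k : Int) + 1)) := by
  rw [PySem.List.pyRange_of_pos 1 ((N : Int) + 1) (by norm_num)]
  rcases Nat.eq_zero_or_pos N with h | h
  · subst h; simp
  · have h1 : (1 : Int) < (N : Int) + 1 := by omega
    rw [if_pos h1, show (N : Int) + 1 - 1 + 1 - 1 = (N : Int) by ring, Int.ediv_one, Int.toNat_natCast]
    exact List.map_congr_left (by intro k _; ring)

lemma insert_idem (d : PySem.Dict Int Int) (k v : Int) :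
    (d.insert k v).insert k v = d.insert k v := by
  apply PySem.Dict.ext
  rw [PySem.Dict.items_insert_of_contains _ v (PySem.Dict.contains_insert_self d k v)]
  conv_rhs => rw [← List.map_id ((d.insert k v).items)]
  apply List.map_congr_left
  intro p hp
  rcases (PySem.Dict.mem_items_insert d k v p).mp hp with h | h
  · subst h; simp
  · simp [h.2]

lemma hins_idem (k off : Int) (e : List (Int × Int)) :
    hins k off (hins k off e) = hins k off e :=
  calc hins k off (hins k off e)
      = ((PySem.Dict.insert (⟨e⟩ : PySem.Dict Int Int) (k + off) 1).insert (k + off) 1).items := rfl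
    _ = (PySem.Dict.insert (⟨e⟩ : PySem.Dict Int Int) (k + off) 1).items := by rw [insert_idem]
    _ = hins k off e := rfl

lemma foldl_if_mem (k : Int) (h : List (Int × Int) → List (Int × Int))
    (hid : ∀ e, h (h e) = h e) :
    ∀ (lst : List Int) (e : List (Int × Int)),
      lst.foldl (fun e i => if i = k then h e else e) e = if k ∈ lst then h e else e := by
  intro lst
  induction lst with
  | nil => intro e; simp
  | cons i lst ih =>
    intro e
    by_cases hik : i = k
    · subst hik
      rw [List.foldl_cons, if_pos rfl, ih (h e)]
      by_cases hm : i ∈ lst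
      · rw [if_pos hm, hid, if_pos (by simp [hm])]
      · rw [if_neg hm, if_pos (by simp)]
    · rw [List.foldl_cons, if_neg hik, ih e]
      by_cases hm : k ∈ lst
      · rw [if_pos hm, if_pos (by simp [hm])]
      · rw [if_neg hm, if_neg (by intro hc; rcases List.mem_cons.mp hc with h | h; exact hik h.symm; exact hm h)]

lemma step_eq (k off : Int) (l : List Int) (e : List (Int × Int)) :
    l.foldl (fun e i => if i = k then (PySem.Dict.insert (⟨e⟩ : PySem.Dict Int Int) (i + off) (1 : Int)).items else e) e
      = if k ∈ l then hins k off e else e := by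
  have hfun : (fun (e : List (Int × Int)) (i : Int) =>
        if i = k then (PySem.Dict.insert (⟨e⟩ : PySem.Dict Int Int) (i + off) (1 : Int)).items else e)
      = fun e i => if i = k then hins k off e else e := by
    funext e i
    by_cases h : i = k
    · subst h; simp [hins]
    · simp [h]
  rw [hfun]
  exact foldl_if_mem k (hins k off) (hins_idem k off) l e

lemma modify_items_of_mem {V : Type} (L : List (Int × V)) (k : Int) (dflt : V) (g : V → V)
    (hnd : (L.map Prod.fst).Nodup) (hmem : k ∈ L.map Prod.fst) :
    (PySem.Dict.modify (⟨L⟩ : PySem.Dict Int V) k dflt g).items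
      = L.map (fun p => if p.1 = k then (p.1, g p.2) else p) := by
  have hkeys : (⟨L⟩ : PySem.Dict Int V).keys = L.map Prod.fst := rfl
  have hc : (⟨L⟩ : PySem.Dict Int V).contains k = true :=
    (PySem.Dict.contains_iff_mem_keys _ _).mpr (by rw [hkeys]; exact hmem)
  show ((⟨L⟩ : PySem.Dict Int V).insert k (g ((⟨L⟩ : PySem.Dict Int V).getD k dflt))).items = _
  rw [PySem.Dict.items_insert_of_contains _ _ hc]
  apply List.map_congr_left
  intro p hp
  by_cases hpk : p.1 = k
  · have hkp : (k, p.2) = p := by cases p; simp_all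
    have hget : (⟨L⟩ : PySem.Dict Int V).get? k = some p.2 :=
      PySem.Dict.get?_of_mem_items (⟨L⟩ : PySem.Dict Int V) (by rw [hkp]; exact hp) (by rw [hkeys]; exact hnd)
    have hgd : (⟨L⟩ : PySem.Dict Int V).getD k dflt = p.2 :=
      PySem.Dict.getD_of_get?_eq_some _ dflt hget
    simp [hpk, hgd]
  · simp [hpk]

lemma foldl_modify_items {V : Type} (f : Int → V → V) (dflt : V) :
    ∀ (lst : List Int) (L : List (Int × V)),
      (L.map Prod.fst).Nodup → (∀ i ∈ lst, i ∈ L.map Prod.fst) →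
      (lst.foldl (fun d i => PySem.Dict.modify d i dflt (f i)) (⟨L⟩ : PySem.Dict Int V)).items
        = L.map (fun p => (p.1, lst.foldl (fun e i => if i = p.1 then f i e else e) p.2)) := by
  intro lst
  induction lst with
  | nil => intro L _ _; simp
  | cons i lst ih =>
    intro L hnd hmem
    have h1 := modify_items_of_mem L i dflt (f i) hnd (hmem i (by simp))
    have hstep : (PySem.Dict.modify (⟨L⟩ : PySem.Dict Int V) i dflt (f i))
        = (⟨L.map (fun p => if p.1 = i then (p.1, f i p.2) else p)⟩ : PySem.Dict Int V) :=
      PySem.Dict.ext h1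
    have hfst : (L.map (fun p => if p.1 = i then (p.1, f i p.2) else p)).map Prod.fst = L.map Prod.fst := by
      rw [List.map_map]
      apply List.map_congr_left
      intro p _
      by_cases h : p.1 = i <;> simp [h]
    rw [List.foldl_cons, hstep,
      ih _ (by rw [hfst]; exact hnd) (fun j hj => by rw [hfst]; exact hmem j (by simp [hj]))]
    rw [List.map_map]
    apply List.map_congr_left
    intro p _
    by_cases h : p.1 = i
    · simp only [Function.comp_def, if_pos h, List.foldl_cons, if_pos h.symm]
    · have hni : ¬ i = p.1 := fun hh => h hh.symm
      simp only [Function.comp_def, if_neg h, List.foldl_cons, if_neg hni]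

-- one link pass over stored items: every listed node gets its link appended in place
lemma pass_items (off : Int) (l : List Int) (L : List (Int × List (Int × Int)))
    (hnd : (L.map Prod.fst).Nodup) (hsub : ∀ i ∈ l, i ∈ L.map Prod.fst) :
    (l.foldl (fun d i => PySem.Dict.modify d i []
        (fun e => (PySem.Dict.insert (⟨e⟩ : PySem.Dict Int Int) (i + off) (1 : Int)).items))
        (⟨L⟩ : PySem.Dict Int (List (Int × Int)))).items
      = L.map (fun q => (q.1, if q.1 ∈ l then hins q.1 off q.2 else q.2)) := by
  rw [foldl_modify_items (fun i e => (PySem.Dict.insert (⟨e⟩ : PySem.Dict Int Int) (i + off) (1 : Int)).items) [] l L hnd hsub]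
  apply List.map_congr_left
  intro q _
  rw [step_eq]

lemma passes_fold_items (passes : List (List Int × Int)) :
    ∀ (L : List (Int × List (Int × Int))),
      (L.map Prod.fst).Nodup →
      (∀ p ∈ passes, ∀ i ∈ p.1, i ∈ L.map Prod.fst) →
      (passes.foldl
          (fun topo p => p.1.foldl
            (fun topo i => PySem.Dict.modify topo i []
              (fun e => (PySem.Dict.insert (⟨e⟩ : PySem.Dict Int Int) (i + p.2) (1 : Int)).items))
            topo)
          (⟨L⟩ : PySem.Dict Int (List (Int × Int)))).items
        = L.map (fun q => (q.1, passes.foldl (fun e p => if q.1 ∈ p.1 then hins q.1 p.2 e else e) q.2)) := by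
  induction passes with
  | nil => intro L _ _; simp
  | cons p ps ih =>
    intro L hnd hsub
    have h1 := pass_items p.2 p.1 L hnd (hsub p (by simp))
    have hstep : (p.1.foldl
        (fun topo i => PySem.Dict.modify topo i []
          (fun e => (PySem.Dict.insert (⟨e⟩ : PySem.Dict Int Int) (i + p.2) (1 : Int)).items))
        (⟨L⟩ : PySem.Dict Int (List (Int × Int))))
        = (⟨L.map (fun q => (q.1, if q.1 ∈ p.1 then hins q.1 p.2 q.2 else q.2))⟩ : PySem.Dict Int (List (Int × Int))) :=
      PySem.Dict.ext h1
    have hfst : (L.map (fun q => (q.1, if q.1 ∈ p.1 then hins q.1 p.2 q.2 else q.2))).map Prod.fst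
        = L.map Prod.fst := by
      rw [List.map_map]; rfl
    rw [List.foldl_cons, hstep,
      ih _ (by rw [hfst]; exact hnd) (fun p' hp' i hi => by rw [hfst]; exact hsub p' (by simp [hp']) i hi)]
    rw [List.map_map]
    apply List.map_congr_left
    intro q _
    simp only [Function.comp_def, List.foldl_cons]

-- coordinate decoding of the linear offset z*(A*B) + y*A + x
lemma lift_decode_div (A B z y x : Int) (hA : 0 < A) (hx : 0 ≤ x) (hx2 : x < A) :
    (z * (A * B) + y * A + x) / A = z * B + y := by
  rw [show z * (A * B) + y * A + x = x + (z * B + y) * A by ring,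
    Int.add_mul_ediv_right _ _ hA.ne', Int.ediv_eq_zero_of_lt hx hx2, zero_add]

lemma lift_decode_mod (A B z y x : Int) (hx : 0 ≤ x) (hx2 : x < A) :
    (z * (A * B) + y * A + x) % A = x := by
  rw [show z * (A * B) + y * A + x = x + (z * B + y) * A by ring,
    Int.add_mul_emod_self_right, Int.emod_eq_of_lt hx hx2]

lemma lift_decode_div2 (A B z y x : Int) (hA : 0 < A) (hB : 0 < B)
    (hx : 0 ≤ x) (hx2 : x < A) (hy : 0 ≤ y) (hy2 : y < B) :
    (z * (A * B) + y * A + x) / (A * B) = z := by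
  have hub : y * A + x < A * B := by
    have h1 : y * A ≤ (B - 1) * A := mul_le_mul_of_nonneg_right (by omega) (le_of_lt hA)
    have h2 : (B - 1) * A + (A - 1) = A * B - 1 := by ring
    linarith
  rw [show z * (A * B) + y * A + x = (y * A + x) + z * (A * B) by ring,
    Int.add_mul_ediv_right _ _ (by positivity : (A * B : Int) ≠ 0),
    Int.ediv_eq_zero_of_lt (by positivity) hub, zero_add]

lemma lift_inj (A B z y x z' y' x' : Int) (hA : 0 < A) (hB : 0 < B)
    (hx : 0 ≤ x) (hx2 : x < A) (hy : 0 ≤ y) (hy2 : y < B)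
    (hx' : 0 ≤ x') (hx2' : x' < A) (hy' : 0 ≤ y') (hy2' : y' < B)
    (heq : z * (A * B) + y * A + x = z' * (A * B) + y' * A + x') :
    z = z' ∧ y = y' ∧ x = x' := by
  have hxeq : x = x' := by
    have h1 := lift_decode_mod A B z y x hx hx2
    have h2 := lift_decode_mod A B z' y' x' hx' hx2'
    rw [heq] at h1; rw [h2] at h1; exact h1.symm
  have hdiv : z * B + y = z' * B + y' := by
    have h1 := lift_decode_div A B z y x hA hx hx2
    have h2 := lift_decode_div A B z' y' x' hA hx' hx2'
    rw [heq] at h1; rw [h2] at h1; exact h1.symm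
  have hyeq : y = y' := by
    have h1 : (z * B + y) % B = y := by
      rw [show z * B + y = y + z * B by ring, Int.add_mul_emod_self_right, Int.emod_eq_of_lt hy hy2]
    have h2 : (z' * B + y') % B = y' := by
      rw [show z' * B + y' = y' + z' * B by ring, Int.add_mul_emod_self_right, Int.emod_eq_of_lt hy' hy2']
    rw [hdiv] at h1; rw [h2] at h1; exact h1.symm
  have hzeq : z = z' := by
    have h3 : z * B = z' * B := by
      have := hdiv; omega
    exact mul_right_cancel₀ hB.ne' h3
  exact ⟨hzeq, hyeq, hxeq⟩

lemma mem_ids_iff (A B z y x zlo zhi ylo yhi xlo xhi : Int) (hA : 0 < A) (hB : 0 < B)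
    (hylo : 0 ≤ ylo) (hyhi : yhi ≤ B) (hxlo : 0 ≤ xlo) (hxhi : xhi ≤ A)
    (hy : 0 ≤ y) (hy2 : y < B) (hx : 0 ≤ x) (hx2 : x < A) :
    (z * (A * B) + y * A + x + 1) ∈
        (PySem.List.pyRange zlo zhi).flatMap (fun z' =>
          (PySem.List.pyRange ylo yhi).flatMap (fun y' =>
            (PySem.List.pyRange xlo xhi).map (fun x' => z' * (A * B) + y' * A + x' + 1)))
      ↔ (zlo ≤ z ∧ z < zhi ∧ ylo ≤ y ∧ y < yhi ∧ xlo ≤ x ∧ x < xhi) := by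
  simp only [List.mem_flatMap, List.mem_map, PySem.List.mem_pyRange_one]
  constructor
  · rintro ⟨z', hz', y', hy', x', hx', heq⟩
    have heq' : z' * (A * B) + y' * A + x' = z * (A * B) + y * A + x := by linarith
    obtain ⟨h1, h2, h3⟩ := lift_inj A B z' y' x' z y x hA hB
      (by omega) (by omega) (by omega) (by omega) hx hx2 hy hy2 heq'
    refine ⟨by omega, by omega, by omega, by omega, by omega, by omega⟩
  · rintro ⟨h1, h2, h3, h4, h5, h6⟩
    exact ⟨z, ⟨h1, h2⟩, y, ⟨h3, h4⟩, x, ⟨h5, h6⟩, rfl⟩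

lemma ids_subset (A B C : Int) (N : Nat) (hA : 0 < A) (hB : 0 < B) (_hC : 0 < C)
    (hN : (N : Int) = A * B * C)
    (zlo zhi ylo yhi xlo xhi : Int) (hzlo : 0 ≤ zlo) (hzhi : zhi ≤ C)
    (hylo : 0 ≤ ylo) (hyhi : yhi ≤ B) (hxlo : 0 ≤ xlo) (hxhi : xhi ≤ A) :
    ∀ i ∈ (PySem.List.pyRange zlo zhi).flatMap (fun z' =>
        (PySem.List.pyRange ylo yhi).flatMap (fun y' =>
          (PySem.List.pyRange xlo xhi).map (fun x' => z' * (A * B) + y' * A + x' + 1))),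
      i ∈ (List.range N).map (fun (t : Nat) => ((t : Int) + 1)) := by
  intro i hi
  simp only [List.mem_flatMap, List.mem_map, PySem.List.mem_pyRange_one] at hi ⊢
  obtain ⟨z, hz', y, hy', x, hx', rfl⟩ := hi
  have hub : z * (A * B) + y * A + x ≤ A * B * C - 1 := by
    have h1 : z * (A * B) ≤ (C - 1) * (A * B) :=
      mul_le_mul_of_nonneg_right (by omega) (by positivity)
    have h2 : y * A ≤ (B - 1) * A := mul_le_mul_of_nonneg_right (by omega) (le_of_lt hA)
    have h3 : (C - 1) * (A * B) + (B - 1) * A + (A - 1) = A * B * C - 1 := by ring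
    linarith
  have hlb : 0 ≤ z * (A * B) + y * A + x := by
    have h1 : 0 ≤ z * (A * B) := mul_nonneg (by omega) (by positivity)
    have h2 : 0 ≤ y * A := mul_nonneg (by omega) (le_of_lt hA)
    linarith
  refine ⟨(z * (A * B) + y * A + x).toNat, ?_, ?_⟩
  · have h5 : ((z * (A * B) + y * A + x).toNat : Int) = z * (A * B) + y * A + x := Int.toNat_of_nonneg hlb
    have h4 : ((z * (A * B) + y * A + x).toNat : Int) < (N : Int) := by rw [h5, hN]; linarith
    rw [List.mem_range]
    exact_mod_cast h4
  · rw [Int.toNat_of_nonneg hlb]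

lemma A_items (mx my mz : Int) (N : Nat) (hN : (N : Int) = mx * my * mz) :
    buildNoCTOPO mx my mz
      = (List.range N).map (fun (t : Nat) => (((t : Int) + 1 : Int), fA mx my mz ((t : Int) + 1))) := by
  have hnodup : ((List.range N).map (fun (t : Nat) => ((t : Int) + 1))).Nodup :=
    List.Nodup.map (fun a b h => by omega) (List.nodup_range)
  rw [buildNoCTOPO_eq_foldl, show mx * my * mz + 1 = (N : Int) + 1 by rw [hN],
    pyRange_one_natCast, List.foldl_map,
    PySem.Dict.items_foldl_insert_fresh _ _ _ _ (fun a _ => by simp [PySem.Dict.contains]) hnodup]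
  simp

lemma A_empty (mx my mz : Int) (h : mx * my * mz ≤ 0) : buildNoCTOPO mx my mz = [] := by
  rw [buildNoCTOPO_eq_foldl, PySem.List.pyRange_of_pos 1 (mx * my * mz + 1) (by norm_num)]
  have : ¬ ((1 : Int) < mx * my * mz + 1) := by omega
  simp [this]

lemma B_empty (mx my mz : Int) (h : mx ≤ 0 ∨ my ≤ 0 ∨ mz ≤ 0) :
    buildNoCTOPO_alt mx my mz = [] := by
  simp only [buildNoCTOPO_alt, if_pos h]

lemma main_core (mx my mz : Int) (hA : 0 < mx) (hB : 0 < my) (hC : 0 < mz) :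
    buildNoCTOPO mx my mz = buildNoCTOPO_alt mx my mz := by
  have hprod : (0 : Int) ≤ mx * my * mz := by positivity
  set N : Nat := (mx * my * mz).toNat with hNdef
  have hN : (N : Int) = mx * my * mz := Int.toNat_of_nonneg hprod
  simp only [buildNoCTOPO_alt]
  rw [if_neg (show ¬ (mx ≤ 0 ∨ my ≤ 0 ∨ mz ≤ 0) by omega)]
  -- initial node pass: self-loops for 1..N in order
  have hnodup : ((List.range N).map (fun (t : Nat) => ((t : Int) + 1))).Nodup :=
    List.Nodup.map (fun a b h => by omega) (List.nodup_range)
  have h0 : ((PySem.List.pyRange 1 (mx * my * mz + 1)).foldl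
      (fun (d : PySem.Dict Int (List (Int × Int))) i => d.insert i [(i, 0)]) ⟨[]⟩)
      = (⟨(List.range N).map (fun (t : Nat) => (((t : Int) + 1 : Int), [(((t : Int) + 1 : Int), (0 : Int))]))⟩ : PySem.Dict Int (List (Int × Int))) := by
    apply PySem.Dict.ext
    rw [show mx * my * mz + 1 = (N : Int) + 1 by rw [hN], pyRange_one_natCast, List.foldl_map,
      PySem.Dict.items_foldl_insert_fresh _ _ _ _ (fun a _ => by simp [PySem.Dict.contains]) hnodup]
    simp
  rw [h0]
  have hfst0 : ((List.range N).map (fun (t : Nat) => (((t : Int) + 1 : Int), [(((t : Int) + 1 : Int), (0 : Int))]))).map Prod.fst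
      = (List.range N).map (fun (t : Nat) => ((t : Int) + 1)) := by
    rw [List.map_map]; rfl
  rw [passes_fold_items _ _ (by rw [hfst0]; exact hnodup) ?hsub]
  case hsub =>
    intro p hp i hi
    rw [hfst0]
    simp only [List.mem_cons, List.not_mem_nil, or_false] at hp
    rcases hp with rfl | rfl | rfl | rfl | rfl | rfl <;>
      [ exact ids_subset mx my mz N hA hB hC hN 0 mz 1 my 0 mx (by omega) (by omega) (by omega) (by omega) (by omega) (by omega) i hi ;
        exact ids_subset mx my mz N hA hB hC hN 0 mz 0 (my - 1) 0 mx (by omega) (by omega) (by omega) (by omega) (by omega) (by omega) i hi ;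
        exact ids_subset mx my mz N hA hB hC hN 0 mz 0 my 1 mx (by omega) (by omega) (by omega) (by omega) (by omega) (by omega) i hi ;
        exact ids_subset mx my mz N hA hB hC hN 0 mz 0 my 0 (mx - 1) (by omega) (by omega) (by omega) (by omega) (by omega) (by omega) i hi ;
        exact ids_subset mx my mz N hA hB hC hN 1 mz 0 my 0 mx (by omega) (by omega) (by omega) (by omega) (by omega) (by omega) i hi ;
        exact ids_subset mx my mz N hA hB hC hN 0 (mz - 1) 0 my 0 mx (by omega) (by omega) (by omega) (by omega) (by omega) (by omega) i hi ]
  rw [A_items mx my mz N hN, List.map_map]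
  apply List.map_congr_left
  intro t ht
  have htN : t < N := List.mem_range.mp ht
  -- decode t into coordinates
  have hxy : (0 : Int) < mx * my := by positivity
  set e : Int := (t : Int) with hedef
  have he0 : 0 ≤ e := by positivity
  have heN : e < mx * my * mz := by
    have : ((t : Nat) : Int) < (N : Int) := by exact_mod_cast htN
    omega
  set z : Int := e / (mx * my) with hzdef
  set r : Int := e % (mx * my) with hrdef
  set y : Int := r / mx with hydef
  set x : Int := r % mx with hxdef
  have hr0 : 0 ≤ r := Int.emod_nonneg e hxy.ne'
  have hr2 : r < mx * my := Int.emod_lt_of_pos e hxy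
  have hx0 : 0 ≤ x := Int.emod_nonneg r hA.ne'
  have hx2 : x < mx := Int.emod_lt_of_pos r hA
  have hy0 : 0 ≤ y := Int.ediv_nonneg hr0 (le_of_lt hA)
  have hy2 : y < my := by
    rw [hydef, Int.ediv_lt_iff_lt_mul hA]
    calc r < mx * my := hr2
      _ = my * mx := by ring
  have hz0 : 0 ≤ z := Int.ediv_nonneg he0 (le_of_lt hxy)
  have hz2 : z < mz := by
    rw [hzdef, Int.ediv_lt_iff_lt_mul hxy]
    calc e < mx * my * mz := heN
      _ = mz * (mx * my) := by ring
  have hrec : e = z * (mx * my) + y * mx + x := by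
    have h1 : mx * my * (e / (mx * my)) + e % (mx * my) = e := Int.mul_ediv_add_emod e (mx * my)
    have h2 : mx * (r / mx) + r % mx = r := Int.mul_ediv_add_emod r mx
    rw [hzdef, hydef, hxdef]
    rw [hrdef] at h2 ⊢
    nlinarith [h1, h2]
  have hk : (t : Int) + 1 = z * (mx * my) + y * mx + x + 1 := by rw [← hedef, hrec]
  simp only [Function.comp_def]
  rw [hk]
  -- rewrite A's per-node conditions and B's pass memberships into the same coordinate facts
  have hj : z * (mx * my) + y * mx + x + 1 - 1 = z * (mx * my) + y * mx + x := by ring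
  have hfd : PySem.Int.floordiv (z * (mx * my) + y * mx + x + 1 - 1) mx = z * my + y := by
    rw [hj, PySem.Int.floordiv_eq_ediv_of_pos hA, lift_decode_div mx my z y x hA hx0 hx2]
  have hmd : PySem.Int.mod (z * (mx * my) + y * mx + x + 1 - 1) mx = x := by
    rw [hj, PySem.Int.mod_eq_emod_of_pos hA, lift_decode_mod mx my z y x hx0 hx2]
  have hfd2 : PySem.Int.floordiv (z * (mx * my) + y * mx + x + 1 - 1) (mx * my) = z := by
    rw [hj, PySem.Int.floordiv_eq_ediv_of_pos hxy,
      lift_decode_div2 mx my z y x hA hB hx0 hx2 hy0 hy2]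
  have hmodzy : PySem.Int.mod (z * my + y) my = y := by
    rw [PySem.Int.mod_eq_emod_of_pos hB, show z * my + y = y + z * my by ring,
      Int.add_mul_emod_self_right, Int.emod_eq_of_lt hy0 hy2]
  have a1 : (PySem.Int.mod (PySem.Int.floordiv (z * (mx * my) + y * mx + x + 1 - 1) mx) my ≠ 0) ↔ (1 ≤ y) := by
    rw [hfd, hmodzy]; omega
  have a2 : (PySem.Int.mod (PySem.Int.floordiv (z * (mx * my) + y * mx + x + 1 - 1) mx) my ≠ my - 1) ↔ (y < my - 1) := by
    rw [hfd, hmodzy]; omega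
  have a3 : (PySem.Int.mod (z * (mx * my) + y * mx + x + 1 - 1) mx ≠ 0) ↔ (1 ≤ x) := by
    rw [hmd]; omega
  have a4 : (PySem.Int.mod (z * (mx * my) + y * mx + x + 1 - 1) mx ≠ mx - 1) ↔ (x < mx - 1) := by
    rw [hmd]; omega
  have a5 : (PySem.Int.floordiv (z * (mx * my) + y * mx + x + 1 - 1) (mx * my) ≠ 0) ↔ (1 ≤ z) := by
    rw [hfd2]; omega
  have a6 : (PySem.Int.floordiv (z * (mx * my) + y * mx + x + 1 - 1) (mx * my) ≠ mz - 1) ↔ (z < mz - 1) := by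
    rw [hfd2]; omega
  have hv1 : (fA1 mx my (z * (mx * my) + y * mx + x + 1)).items
      = if 1 ≤ y then hins (z * (mx * my) + y * mx + x + 1) (-my) [((z * (mx * my) + y * mx + x + 1 : Int), (0 : Int))] else [((z * (mx * my) + y * mx + x + 1 : Int), (0 : Int))] := by
    simp only [fA1]
    by_cases h : 1 ≤ y
    · rw [if_pos (a1.mpr h), if_pos h]; rfl
    · rw [if_neg (fun hh => h (a1.mp hh)), if_neg h]; rfl
  have hv2 : (fA2 mx my (z * (mx * my) + y * mx + x + 1)).items
      = if y < my - 1 then hins (z * (mx * my) + y * mx + x + 1) my ((fA1 mx my (z * (mx * my) + y * mx + x + 1)).items) else (fA1 mx my (z * (mx * my) + y * mx + x + 1)).items := by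
    simp only [fA2]
    by_cases h : y < my - 1
    · rw [if_pos (a2.mpr h), if_pos h]; rfl
    · rw [if_neg (fun hh => h (a2.mp hh)), if_neg h]
  have hv3 : (fA3 mx my (z * (mx * my) + y * mx + x + 1)).items
      = if 1 ≤ x then hins (z * (mx * my) + y * mx + x + 1) (-1) ((fA2 mx my (z * (mx * my) + y * mx + x + 1)).items) else (fA2 mx my (z * (mx * my) + y * mx + x + 1)).items := by
    simp only [fA3]
    by_cases h : 1 ≤ x
    · rw [if_pos (a3.mpr h), if_pos h]; rfl
    · rw [if_neg (fun hh => h (a3.mp hh)), if_neg h]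
  have hv4 : (fA4 mx my (z * (mx * my) + y * mx + x + 1)).items
      = if x < mx - 1 then hins (z * (mx * my) + y * mx + x + 1) 1 ((fA3 mx my (z * (mx * my) + y * mx + x + 1)).items) else (fA3 mx my (z * (mx * my) + y * mx + x + 1)).items := by
    simp only [fA4]
    by_cases h : x < mx - 1
    · rw [if_pos (a4.mpr h), if_pos h]; rfl
    · rw [if_neg (fun hh => h (a4.mp hh)), if_neg h]
  have hv5 : (fA5 mx my (z * (mx * my) + y * mx + x + 1)).items
      = if 1 ≤ z then hins (z * (mx * my) + y * mx + x + 1) (-(mx * my)) ((fA4 mx my (z * (mx * my) + y * mx + x + 1)).items) else (fA4 mx my (z * (mx * my) + y * mx + x + 1)).items := by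
    simp only [fA5]
    by_cases h : 1 ≤ z
    · rw [if_pos (a5.mpr h), if_pos h]; rfl
    · rw [if_neg (fun hh => h (a5.mp hh)), if_neg h]
  have hv6 : (fA6 mx my mz (z * (mx * my) + y * mx + x + 1)).items
      = if z < mz - 1 then hins (z * (mx * my) + y * mx + x + 1) (mx * my) ((fA5 mx my (z * (mx * my) + y * mx + x + 1)).items) else (fA5 mx my (z * (mx * my) + y * mx + x + 1)).items := by
    simp only [fA6]
    by_cases h : z < mz - 1
    · rw [if_pos (a6.mpr h), if_pos h]; rfl
    · rw [if_neg (fun hh => h (a6.mp hh)), if_neg h]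
  have m1 : ((z * (mx * my) + y * mx + x + 1) ∈
      (PySem.List.pyRange 0 mz).flatMap (fun z' =>
        (PySem.List.pyRange 1 my).flatMap (fun y' =>
          (PySem.List.pyRange 0 mx).map (fun x' => z' * (mx * my) + y' * mx + x' + 1)))) = (1 ≤ y) := by
    rw [mem_ids_iff mx my z y x 0 mz 1 my 0 mx hA hB (by omega) (by omega) (by omega) (by omega) hy0 hy2 hx0 hx2]
    exact propext (by constructor; · intro h; omega
                      · intro h; omega)
  have m2 : ((z * (mx * my) + y * mx + x + 1) ∈
      (PySem.List.pyRange 0 mz).flatMap (fun z' =>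
        (PySem.List.pyRange 0 (my - 1)).flatMap (fun y' =>
          (PySem.List.pyRange 0 mx).map (fun x' => z' * (mx * my) + y' * mx + x' + 1)))) = (y < my - 1) := by
    rw [mem_ids_iff mx my z y x 0 mz 0 (my - 1) 0 mx hA hB (by omega) (by omega) (by omega) (by omega) hy0 hy2 hx0 hx2]
    exact propext (by constructor; · intro h; omega
                      · intro h; omega)
  have m3 : ((z * (mx * my) + y * mx + x + 1) ∈
      (PySem.List.pyRange 0 mz).flatMap (fun z' =>
        (PySem.List.pyRange 0 my).flatMap (fun y' =>
          (PySem.List.pyRange 1 mx).map (fun x' => z' * (mx * my) + y' * mx + x' + 1)))) = (1 ≤ x) := by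
    rw [mem_ids_iff mx my z y x 0 mz 0 my 1 mx hA hB (by omega) (by omega) (by omega) (by omega) hy0 hy2 hx0 hx2]
    exact propext (by constructor; · intro h; omega
                      · intro h; omega)
  have m4 : ((z * (mx * my) + y * mx + x + 1) ∈
      (PySem.List.pyRange 0 mz).flatMap (fun z' =>
        (PySem.List.pyRange 0 my).flatMap (fun y' =>
          (PySem.List.pyRange 0 (mx - 1)).map (fun x' => z' * (mx * my) + y' * mx + x' + 1)))) = (x < mx - 1) := by
    rw [mem_ids_iff mx my z y x 0 mz 0 my 0 (mx - 1) hA hB (by omega) (by omega) (by omega) (by omega) hy0 hy2 hx0 hx2]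
    exact propext (by constructor; · intro h; omega
                      · intro h; omega)
  have m5 : ((z * (mx * my) + y * mx + x + 1) ∈
      (PySem.List.pyRange 1 mz).flatMap (fun z' =>
        (PySem.List.pyRange 0 my).flatMap (fun y' =>
          (PySem.List.pyRange 0 mx).map (fun x' => z' * (mx * my) + y' * mx + x' + 1)))) = (1 ≤ z) := by
    rw [mem_ids_iff mx my z y x 1 mz 0 my 0 mx hA hB (by omega) (by omega) (by omega) (by omega) hy0 hy2 hx0 hx2]
    exact propext (by constructor; · intro h; omega
                      · intro h; omega)
  have m6 : ((z * (mx * my) + y * mx + x + 1) ∈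
      (PySem.List.pyRange 0 (mz - 1)).flatMap (fun z' =>
        (PySem.List.pyRange 0 my).flatMap (fun y' =>
          (PySem.List.pyRange 0 mx).map (fun x' => z' * (mx * my) + y' * mx + x' + 1)))) = (z < mz - 1) := by
    rw [mem_ids_iff mx my z y x 0 (mz - 1) 0 my 0 mx hA hB (by omega) (by omega) (by omega) (by omega) hy0 hy2 hx0 hx2]
    exact propext (by constructor; · intro h; omega
                      · intro h; omega)
  simp only [Prod.mk.injEq]
  refine ⟨trivial, ?_⟩
  simp only [List.foldl_cons, List.foldl_nil, m1, m2, m3, m4, m5, m6]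
  rw [fA, hv6, hv5, hv4, hv3, hv2, hv1]

lemma main_nonneg (mx my mz : Int) (hx : 0 ≤ mx) (hy : 0 ≤ my) (hz : 0 ≤ mz) :
    buildNoCTOPO mx my mz = buildNoCTOPO_alt mx my mz := by
  by_cases hpos : 0 < mx ∧ 0 < my ∧ 0 < mz
  · exact main_core mx my mz hpos.1 hpos.2.1 hpos.2.2
  · have h0 : mx = 0 ∨ my = 0 ∨ mz = 0 := by omega
    rw [A_empty mx my mz (by rcases h0 with h | h | h <;> rw [h] <;> ring_nf <;> simp),
      B_empty mx my mz (by omega)]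

-- ===== VERDICT (by name: the statement is the Claim_ definition above) =====
theorem buildNoCTOPO_spec : Claim_equal_buildNoCTOPO := by
  intro mx my mz _ hpre
  unfold Spec_buildNoCTOPO
  by_cases hnn : 0 ≤ mx ∧ 0 ≤ my ∧ 0 ≤ mz
  · exact main_nonneg mx my mz hnn.1 hnn.2.1 hnn.2.2
  · have hprod : mx * my * mz ≤ 0 := by
      rcases hpre with h | h
      · exact absurd h hnn
      · exact h
    rw [A_empty mx my mz hprod, B_empty mx my mz (by omega)]
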